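-- pv_equiv track=rewrite | github.com/YA-AR/Tetris | strategy_properties.py | find_holes
-- ===== SOURCE A (Python) =====
-- import copy
--
-- def find_holes(matrix):
--     ''' need to improve if shapes can pass obstecels'''
--     m = len(matrix)
--     n = len(matrix[0])
--     matrix_c = copy.deepcopy(matrix)
--     for i in range(n):
--         if matrix_c[0][i] == 0:
--             matrix_c[0][i] = -1
--     for i in range(1, m):
--         for j in range(0, n):
--             if matrix[i][j] == 0 and (matrix_c[i - 1][j] == -1):
--                 matrix_c[i][j] = -1
--     res = []
--     for i in range(m):
--         for j in range(n):
--             if matrix_c[i][j] == 0: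
--                 res.append([i, j])
--     return res
-- ===== SOURCE B (Python) =====
-- def find_holes(matrix):
--     n = len(matrix[0])
--     open_ = [True] * n
--     res = []
--     for i, row in enumerate(matrix):
--         for j in range(n):
--             if row[j] == 0:
--                 if not open_[j]:
--                     res.append([i, j])
--             else:
--                 open_[j] = False
--     return res
-- ===== Notes on version B (the rewrite author's own statement) =====
-- stated objective: simpler
-- what changed: B replaces A's deep-copied 2-D marked grid (top-row pass, propagation pass, then a separate collection pass) with a single top-to-bottom row-major pass keeping only a 1-D per-column 'still open' boolean array and emitting holes on the fly; …
-- outside the precondition, e.g. on find_holes([[1], [-1], [0]]): A returns [], B returns [[2, 0]]; on find_holes([[-1], [0]]): A returns [], B returns [[1, 0]]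
import Mathlib
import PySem

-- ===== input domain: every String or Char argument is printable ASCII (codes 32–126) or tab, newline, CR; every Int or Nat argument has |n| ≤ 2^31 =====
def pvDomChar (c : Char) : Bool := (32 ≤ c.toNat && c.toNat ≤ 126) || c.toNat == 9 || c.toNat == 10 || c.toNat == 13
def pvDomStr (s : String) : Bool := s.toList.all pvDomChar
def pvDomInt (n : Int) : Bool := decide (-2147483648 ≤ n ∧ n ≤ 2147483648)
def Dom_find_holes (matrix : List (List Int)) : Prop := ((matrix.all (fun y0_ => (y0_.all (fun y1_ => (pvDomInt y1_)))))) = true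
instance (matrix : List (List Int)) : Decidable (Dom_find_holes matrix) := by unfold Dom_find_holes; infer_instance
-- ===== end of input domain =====

-- B replaces A's deep-copied marked grid and three passes by one row-major pass with a 1-D per-column open/closed state (objective: simpler).

-- ===== PORT A =====
-- 'for i in range(n): if matrix_c[0][i] == 0: matrix_c[0][i] = -1'  (in-place update of row 0)
def fhMarkTop (n : Nat) (row : List Int) : List Int :=
  (List.range n).foldl (fun r i => if r.getD i 0 == 0 then r.set i (-1) else r) row

-- inner loop of 'for i in range(1, m)': reads matrix[i][j] (row) and matrix_c[i-1][j] (prev), writes matrix_c[i][j]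
def fhMarkRow (n : Nat) (prev row : List Int) : List Int :=
  (List.range n).foldl (fun r j => if row.getD j 0 == 0 && prev.getD j 0 == -1 then r.set j (-1) else r) row

-- the outer loop 'for i in range(1, m)': each matrix_c row is computed from the previous one
def fhBuild (n : Nat) (prev : List Int) : List (List Int) → List (List Int)
  | [] => []
  | row :: rest => fhMarkRow n prev row :: fhBuild n (fhMarkRow n prev row) rest

-- 'for j in range(n): if matrix_c[i][j] == 0: res.append([i, j])'
def fhRowCollect (n : Nat) (i : Nat) (row : List Int) (res : List (List Int)) : List (List Int) :=
  (List.range n).foldl (fun res j => if row.getD j 0 == 0 then res ++ [[(i : Int), (j : Int)]] else res) res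

-- 'for i in range(m): …' over matrix_c
def fhCollect (n : Nat) : Nat → List (List Int) → List (List Int) → List (List Int)
  | _, [], res => res
  | i, row :: rest, res => fhCollect n (i + 1) rest (fhRowCollect n i row res)

def find_holes (matrix : List (List Int)) : List (List Int) :=
  match matrix with
  | [] => []  -- Python raises IndexError here (excluded by Pre_)
  | r0 :: rest =>
    let n := r0.length
    let mc0 := fhMarkTop n r0
    fhCollect n 0 (mc0 :: fhBuild n mc0 rest) []

-- ===== PORT B =====
-- inner loop 'for j in range(n)' of Source B, state = (open_, res)
def fhRowStep (n : Nat) (i : Nat) (row : List Int) (st : List Bool × List (List Int)) :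
    List Bool × List (List Int) :=
  (List.range n).foldl (fun st j =>
    if row.getD j 0 == 0 then
      (st.1, if !(st.1.getD j false) then st.2 ++ [[(i : Int), (j : Int)]] else st.2)
    else (st.1.set j false, st.2)) st

-- 'for i, row in enumerate(matrix)'
def fhLoop (n : Nat) : Nat → List Bool → List (List Int) → List (List Int) → List (List Int)
  | _, _, [], res => res
  | i, o, row :: rest, res =>
    fhLoop n (i + 1) (fhRowStep n i row (o, res)).1 rest (fhRowStep n i row (o, res)).2

def find_holes_alt (matrix : List (List Int)) : List (List Int) :=
  let n := (matrix.headD []).length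
  fhLoop n 0 (List.replicate n true) matrix []

-- ===== PRECONDITION & SPEC =====
-- Pre_ excludes the inputs where Python A raises IndexError (an empty matrix, or a row shorter
-- than row 0), and matrices where a cell valued -1 sits directly above a cell valued 0 in one
-- of the first n columns: there the input value -1 collides with A's internal -1 marker (A
-- treats the cell below as reachable, B treats any nonzero cell as blocking), and since real
-- grids hold 0 or positive piece ids either behaviour is defensible on that corner.
def Pre_find_holes (matrix : List (List Int)) : Prop :=
  (!matrix.isEmpty && matrix.all (fun row =>
    Nat.ble (matrix.headD []).length row.length)) = true ∧
  List.IsChain (fun r r' => ∀ j, j < (matrix.headD []).length →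
    r'.getD j 0 = 0 → r.getD j 0 ≠ -1) matrix
instance (matrix : List (List Int)) : Decidable (Pre_find_holes matrix) := by
  unfold Pre_find_holes; infer_instance

def pvWitness_find_holes : List (List Int) := [[0, 1, 0], [0, 0, 2], [1, 0, 0]]

def Spec_find_holes (matrix : List (List Int)) (out : List (List Int)) : Prop := out = find_holes_alt matrix
instance (matrix : List (List Int)) (out : List (List Int)) : Decidable (Spec_find_holes matrix out) := by unfold Spec_find_holes; infer_instance

-- ===== CLAIM (what is proved, stated in full; the proofs are below) =====
def Claim_equal_find_holes : Prop := ∀ (matrix : List (List Int)), Dom_find_holes matrix → Pre_find_holes matrix → Spec_find_holes matrix (find_holes matrix)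

-- ===== LEMMAS AND PROOFS =====

theorem pvGetD_set {α : Type} (l : List α) (i j : Nat) (a d : α) :
    (l.set i a).getD j d = if i = j ∧ i < l.length then a else l.getD j d := by
  simp only [List.getD_eq_getElem?_getD, List.getElem?_set]
  by_cases h1 : i = j
  · subst h1
    by_cases h2 : i < l.length
    · simp [h2]
    · simp [h2]
  · simp [h1]

theorem fhMarkTop_length (n : Nat) (row : List Int) : (fhMarkTop n row).length = row.length := by
  unfold fhMarkTop
  induction n with
  | zero => simp
  | succ k ih =>
    rw [List.range_succ, List.foldl_append, List.foldl_cons, List.foldl_nil]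
    split
    · rw [List.length_set]; exact ih
    · exact ih

theorem fhMarkTop_getD : ∀ (n : Nat) (row : List Int), n ≤ row.length →
    ∀ j, (fhMarkTop n row).getD j 0 = if j < n ∧ row.getD j 0 = 0 then -1 else row.getD j 0 := by
  intro n
  induction n with
  | zero => intro row _ j; simp [fhMarkTop]
  | succ k ih =>
    intro row hn j
    have hk : k ≤ row.length := Nat.le_of_succ_le hn
    have hlen := fhMarkTop_length k row
    have hstep : fhMarkTop (k + 1) row =
        (if (fhMarkTop k row).getD k 0 == 0 then (fhMarkTop k row).set k (-1) else fhMarkTop k row) := by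
      conv_lhs => unfold fhMarkTop
      rw [List.range_succ, List.foldl_append, List.foldl_cons, List.foldl_nil]
      rfl
    have hkk : (fhMarkTop k row).getD k 0 = row.getD k 0 := by
      rw [ih row hk k]; simp
    rw [hstep]
    by_cases h0 : row.getD k 0 = 0
    · rw [if_pos (by rw [hkk]; simp only [beq_iff_eq]; exact h0)]
      rw [pvGetD_set, hlen]
      by_cases hjk : k = j
      · subst hjk
        rw [if_pos ⟨rfl, hn⟩, if_pos ⟨Nat.lt_succ_self _, h0⟩]
      · rw [if_neg (fun h => hjk h.1), ih row hk j]
        have : (j < k ∧ row.getD j 0 = 0) ↔ (j < k + 1 ∧ row.getD j 0 = 0) := by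
          constructor
          · rintro ⟨h1, h2⟩; exact ⟨Nat.lt_succ_of_lt h1, h2⟩
          · rintro ⟨h1, h2⟩
            refine ⟨?_, h2⟩
            rcases Nat.lt_succ_iff_lt_or_eq.mp h1 with h | h
            · exact h
            · exact absurd h.symm hjk
        rw [if_congr this rfl rfl]
    · rw [if_neg (by rw [hkk]; simp only [beq_iff_eq]; exact h0), ih row hk j]
      have : (j < k ∧ row.getD j 0 = 0) ↔ (j < k + 1 ∧ row.getD j 0 = 0) := by
        constructor
        · rintro ⟨h1, h2⟩; exact ⟨Nat.lt_succ_of_lt h1, h2⟩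
        · rintro ⟨h1, h2⟩
          refine ⟨?_, h2⟩
          rcases Nat.lt_succ_iff_lt_or_eq.mp h1 with h | h
          · exact h
          · subst h; exact absurd h2 h0
      rw [if_congr this rfl rfl]

theorem fhMarkRow_length (n : Nat) (prev row : List Int) :
    (fhMarkRow n prev row).length = row.length := by
  unfold fhMarkRow
  induction n with
  | zero => simp
  | succ k ih =>
    rw [List.range_succ, List.foldl_append, List.foldl_cons, List.foldl_nil]
    split
    · rw [List.length_set]; exact ih
    · exact ih

theorem fhMarkRow_getD : ∀ (n : Nat) (prev row : List Int), n ≤ row.length →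
    ∀ j, (fhMarkRow n prev row).getD j 0 =
      if j < n ∧ row.getD j 0 = 0 ∧ prev.getD j 0 = -1 then -1 else row.getD j 0 := by
  intro n
  induction n with
  | zero => intro prev row _ j; simp [fhMarkRow]
  | succ k ih =>
    intro prev row hn j
    have hk : k ≤ row.length := Nat.le_of_succ_le hn
    have hlen := fhMarkRow_length k prev row
    have hstep : fhMarkRow (k + 1) prev row =
        (if row.getD k 0 == 0 && prev.getD k 0 == -1 then (fhMarkRow k prev row).set k (-1)
         else fhMarkRow k prev row) := by
      conv_lhs => unfold fhMarkRow
      rw [List.range_succ, List.foldl_append, List.foldl_cons, List.foldl_nil]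
      rfl
    rw [hstep]
    by_cases h0 : row.getD k 0 = 0 ∧ prev.getD k 0 = -1
    · rw [if_pos (by simp only [Bool.and_eq_true, beq_iff_eq]; exact h0)]
      rw [pvGetD_set, hlen]
      by_cases hjk : k = j
      · subst hjk
        rw [if_pos ⟨rfl, hn⟩, if_pos ⟨Nat.lt_succ_self _, h0.1, h0.2⟩]
      · rw [if_neg (fun h => hjk h.1), ih prev row hk j]
        have : (j < k ∧ row.getD j 0 = 0 ∧ prev.getD j 0 = -1) ↔
               (j < k + 1 ∧ row.getD j 0 = 0 ∧ prev.getD j 0 = -1) := by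
          constructor
          · rintro ⟨h1, h2⟩; exact ⟨Nat.lt_succ_of_lt h1, h2⟩
          · rintro ⟨h1, h2⟩
            refine ⟨?_, h2⟩
            rcases Nat.lt_succ_iff_lt_or_eq.mp h1 with h | h
            · exact h
            · exact absurd h.symm hjk
        rw [if_congr this rfl rfl]
    · rw [if_neg (by simp only [Bool.and_eq_true, beq_iff_eq]; exact h0)]
      rw [ih prev row hk j]
      have : (j < k ∧ row.getD j 0 = 0 ∧ prev.getD j 0 = -1) ↔
             (j < k + 1 ∧ row.getD j 0 = 0 ∧ prev.getD j 0 = -1) := by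
        constructor
        · rintro ⟨h1, h2⟩; exact ⟨Nat.lt_succ_of_lt h1, h2⟩
        · rintro ⟨h1, h2⟩
          refine ⟨?_, h2⟩
          rcases Nat.lt_succ_iff_lt_or_eq.mp h1 with h | h
          · exact h
          · subst h; exact absurd h2 h0
      rw [if_congr this rfl rfl]

theorem fhRowStep_spec : ∀ (k i : Nat) (row : List Int) (o : List Bool) (res : List (List Int)),
    k ≤ o.length →
    (fhRowStep k i row (o, res)).1.length = o.length ∧
    (∀ j, (fhRowStep k i row (o, res)).1.getD j false =
      if j < k then (if row.getD j 0 = 0 then o.getD j false else false)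
      else o.getD j false) ∧
    (fhRowStep k i row (o, res)).2 =
      (List.range k).foldl (fun res j =>
        if row.getD j 0 == 0 && !(o.getD j false) then res ++ [[(i : Int), (j : Int)]] else res) res := by
  intro k
  induction k with
  | zero =>
    intro i row o res _
    refine ⟨by simp [fhRowStep], fun j => by simp [fhRowStep], by simp [fhRowStep]⟩
  | succ k ih =>
    intro i row o res hk
    have hk' : k ≤ o.length := Nat.le_of_succ_le hk
    obtain ⟨ihlen, ihopen, ihres⟩ := ih i row o res hk'
    have hstep : fhRowStep (k + 1) i row (o, res) =
        (let st := fhRowStep k i row (o, res)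
         if row.getD k 0 == 0 then
           (st.1, if !(st.1.getD k false) then st.2 ++ [[(i : Int), (k : Int)]] else st.2)
         else (st.1.set k false, st.2)) := by
      conv_lhs => unfold fhRowStep
      rw [List.range_succ, List.foldl_append, List.foldl_cons, List.foldl_nil]
      rfl
    have hok : (fhRowStep k i row (o, res)).1.getD k false = o.getD k false := by
      rw [ihopen k]; simp
    rw [hstep]
    simp only []
    by_cases h0 : row.getD k 0 = 0
    · rw [if_pos (by simp only [beq_iff_eq]; exact h0)]
      refine ⟨ihlen, ?_, ?_⟩
      · intro j
        rw [ihopen j]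
        by_cases hjk : j = k
        · subst hjk
          rw [if_neg (lt_irrefl _), if_pos (Nat.lt_succ_self _), if_pos h0]
        · by_cases hj : j < k
          · rw [if_pos hj, if_pos (Nat.lt_succ_of_lt hj)]
          · rw [if_neg hj, if_neg (by omega)]
      · rw [List.range_succ, List.foldl_append, List.foldl_cons, List.foldl_nil, ← ihres, hok]
        have hcond : (row.getD k 0 == 0 && !(o.getD k false)) = !(o.getD k false) := by
          rw [h0]; simp
        rw [hcond]
    · rw [if_neg (by simp only [beq_iff_eq]; exact h0)]
      have hres' : (List.range (k + 1)).foldl (fun res j =>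
          if row.getD j 0 == 0 && !(o.getD j false) then res ++ [[(i : Int), (j : Int)]] else res) res
          = (fhRowStep k i row (o, res)).2 := by
        rw [List.range_succ, List.foldl_append, List.foldl_cons, List.foldl_nil, ← ihres]
        have hcond : (row.getD k 0 == 0 && !(o.getD k false)) = false := by
          rw [beq_eq_false_iff_ne.mpr h0]; rfl
        rw [hcond]
        simp
      refine ⟨by rw [List.length_set, ihlen], ?_, hres'.symm⟩
      intro j
      rw [pvGetD_set, ihlen]
      by_cases hjk : k = j
      · subst hjk
        rw [if_pos ⟨rfl, hk⟩, if_pos (Nat.lt_succ_self _), if_neg h0]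
      · rw [if_neg (fun h => hjk h.1), ihopen j]
        by_cases hj : j < k
        · rw [if_pos hj, if_pos (Nat.lt_succ_of_lt hj)]
        · rw [if_neg hj, if_neg (by omega)]

theorem fhRowStep_vs_mc (n i : Nat) (row : List Int) (o : List Bool) (res : List (List Int))
    (mcrow : List Int) (ho : o.length = n)
    (hmc : ∀ j, j < n → mcrow.getD j 0 =
      if row.getD j 0 = 0 ∧ o.getD j false = true then -1 else row.getD j 0) :
    (fhRowStep n i row (o, res)).2 = fhRowCollect n i mcrow res ∧
    (fhRowStep n i row (o, res)).1.length = n ∧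
    (∀ j, j < n → row.getD j 0 ≠ -1 →
      ((fhRowStep n i row (o, res)).1.getD j false = true ↔ mcrow.getD j 0 = -1)) := by
  obtain ⟨hlen, hopen, hres⟩ := fhRowStep_spec n i row o res (le_of_eq ho.symm)
  refine ⟨?_, by rw [hlen, ho], ?_⟩
  · rw [hres]
    unfold fhRowCollect
    apply PySem.List.foldl_congr_mem
    intro acc j hj
    have hjn : j < n := List.mem_range.mp hj
    have hcond : (row.getD j 0 == 0 && !(o.getD j false)) = (mcrow.getD j 0 == 0) := by
      rw [hmc j hjn]
      by_cases h0 : row.getD j 0 = 0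
      · by_cases hb : o.getD j false = true
        · rw [if_pos ⟨h0, hb⟩, h0, hb]; decide
        · have hb' : o.getD j false = false := Bool.eq_false_iff.mpr hb
          rw [if_neg (fun h => hb h.2), h0, hb']; decide
      · rw [if_neg (fun h => h0 h.1), beq_eq_false_iff_ne.mpr h0]
        simp
    rw [hcond]
  · intro j hjn hne
    rw [hopen j, if_pos hjn, hmc j hjn]
    by_cases h0 : row.getD j 0 = 0
    · rw [if_pos h0]
      by_cases hb : o.getD j false = true
      · rw [if_pos ⟨h0, hb⟩]
        exact iff_of_true hb rfl
      · rw [if_neg (fun h => hb h.2), h0]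
        exact iff_of_false hb (by norm_num)
    · rw [if_neg h0, if_neg (fun h => h0 h.1)]
      exact iff_of_false (by simp) hne

theorem fhLoop_eq_fhCollect (n : Nat) (rest : List (List Int)) :
    ∀ (prev_raw prev : List Int) (o : List Bool) (i : Nat) (res : List (List Int)),
    o.length = n → (∀ r ∈ rest, n ≤ r.length) →
    List.IsChain (fun r r' => ∀ j, j < n → r'.getD j 0 = 0 → r.getD j 0 ≠ -1) (prev_raw :: rest) →
    (∀ j, j < n → prev_raw.getD j 0 ≠ -1 → (o.getD j false = true ↔ prev.getD j 0 = -1)) →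
    fhLoop n i o rest res = fhCollect n i (fhBuild n prev rest) res := by
  induction rest with
  | nil => intro prev_raw prev o i res _ _ _ _; rfl
  | cons row rest ih =>
    intro prev_raw prev o i res ho hrows hch hinv
    rw [List.isChain_cons_cons] at hch
    obtain ⟨hP, hch'⟩ := hch
    have hrow : n ≤ row.length := hrows row (List.mem_cons_self ..)
    have hmc : ∀ j, j < n → (fhMarkRow n prev row).getD j 0 =
        if row.getD j 0 = 0 ∧ o.getD j false = true then -1 else row.getD j 0 := by
      intro j hj
      rw [fhMarkRow_getD n prev row hrow j]
      by_cases h0 : row.getD j 0 = 0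
      · have hio := hinv j hj (hP j hj h0)
        by_cases hb : o.getD j false = true
        · rw [if_pos ⟨hj, h0, hio.mp hb⟩, if_pos ⟨h0, hb⟩]
        · rw [if_neg (fun h => hb (hio.mpr h.2.2)), if_neg (fun h => hb h.2)]
      · rw [if_neg (fun h => h0 h.2.1), if_neg (fun h => h0 h.1)]
    obtain ⟨hres, hlen, hinv'⟩ := fhRowStep_vs_mc n i row o res (fhMarkRow n prev row) ho hmc
    show fhLoop n (i + 1) _ rest _ = fhCollect n (i + 1) (fhBuild n (fhMarkRow n prev row) rest) (fhRowCollect n i (fhMarkRow n prev row) res)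
    rw [hres]
    exact ih row (fhMarkRow n prev row) _ (i + 1) _ hlen
      (fun r hr => hrows r (List.mem_cons_of_mem _ hr)) hch' hinv'

-- ===== VERDICT (by name: the statement is the Claim_ definition above) =====
theorem find_holes_spec : Claim_equal_find_holes := by
  intro matrix _ hpre
  unfold Spec_find_holes
  unfold Pre_find_holes at hpre
  obtain ⟨hpre1, hch⟩ := hpre
  cases matrix with
  | nil => simp at hpre1
  | cons r0 rest =>
    simp only [Bool.and_eq_true, List.all_eq_true] at hpre1
    set n := r0.length with hn
    have hrows : ∀ row ∈ r0 :: rest, n ≤ row.length := by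
      intro row hr
      exact Nat.le_of_ble_eq_true (hpre1.2 row hr)
    have hch' : List.IsChain (fun r r' => ∀ j, j < n → r'.getD j 0 = 0 → r.getD j 0 ≠ -1)
        (r0 :: rest) := hch
    have hmc0 : ∀ j, j < n → (fhMarkTop n r0).getD j 0 =
        if r0.getD j 0 = 0 ∧ (List.replicate n true).getD j false = true then -1 else r0.getD j 0 := by
      intro j hj
      rw [fhMarkTop_getD n r0 (le_refl _) j]
      have hrep : (List.replicate n true).getD j false = true := by
        simp [List.getD_eq_getElem?_getD, hj]
      rw [hrep]
      by_cases h0 : r0.getD j 0 = 0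
      · rw [if_pos ⟨hj, h0⟩, if_pos ⟨h0, rfl⟩]
      · rw [if_neg (fun h => h0 h.2), if_neg (fun h => h0 h.1)]
    obtain ⟨hres, hlen, hinv⟩ := fhRowStep_vs_mc n 0 r0 (List.replicate n true) []
      (fhMarkTop n r0) (List.length_replicate) hmc0
    show fhCollect n 0 (fhMarkTop n r0 :: fhBuild n (fhMarkTop n r0) rest) [] =
      fhLoop n 0 (List.replicate n true) (r0 :: rest) []
    show fhCollect n 1 (fhBuild n (fhMarkTop n r0) rest) (fhRowCollect n 0 (fhMarkTop n r0) []) =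
      fhLoop n 1 (fhRowStep n 0 r0 (List.replicate n true, [])).1 rest
        (fhRowStep n 0 r0 (List.replicate n true, [])).2
    rw [hres, fhLoop_eq_fhCollect n rest r0 (fhMarkTop n r0) _ 1 _ hlen
      (fun r hr => hrows r (List.mem_cons_of_mem _ hr)) hch' hinv]
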